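-- pv_equiv track=rewrite | github.com/projeto-de-algoritmos/PD_Dupla19_Exercicios | codes/robbers_watch.py | itov
-- ===== SOURCE A (Python) =====
-- BASE = 7
--
-- def itov(x):
--     digits = []
--     if x == 0:
--         digits.append(0)
--     while x > 0:
--         digits.append(x % BASE)
--         x //= BASE
--     digits.reverse()
--     return digits
-- ===== SOURCE B (Python) =====
-- def itov(x):
--     if x == 0:
--         return [0]
--     # counting pass: number of base-7 digits of x
--     n = 0
--     t = x
--     while t > 0:
--         t //= 7
--         n += 1
--     # build most-significant-first directly (n == 0 for negative x -> [])
--     return [(x // 7 ** (n - 1 - i)) % 7 for i in range(n)]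
-- ===== Notes on version B (the rewrite author's own statement) =====
-- stated objective: alternative
-- what changed: Replaces A's append-LSB-then-reverse loop by a separate digit-counting pass followed by a most-significant-first comprehension computing each digit with a power of 7.
import Mathlib
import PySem

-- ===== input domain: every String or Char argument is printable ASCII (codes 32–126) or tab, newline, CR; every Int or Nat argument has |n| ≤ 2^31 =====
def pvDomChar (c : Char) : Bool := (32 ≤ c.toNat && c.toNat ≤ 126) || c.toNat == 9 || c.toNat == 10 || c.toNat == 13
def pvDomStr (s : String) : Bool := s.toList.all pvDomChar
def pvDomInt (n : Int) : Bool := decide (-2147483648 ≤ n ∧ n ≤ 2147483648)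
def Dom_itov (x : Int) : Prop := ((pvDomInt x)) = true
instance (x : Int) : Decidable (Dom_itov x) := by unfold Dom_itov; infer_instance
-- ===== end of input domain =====

-- B replaces A's append-LSB-then-reverse loop by a counting pass plus a most-significant-first comprehension (alternative decomposition, same cost).


-- ===== PORT A =====
-- while x > 0: digits.append(x % 7); x //= 7
def itovLoop (x : Int) (digits : List Int) : List Int :=
  if _h : x > 0 then
    itovLoop (PySem.Int.floordiv x 7) (digits ++ [PySem.Int.mod x 7])
  else digits
termination_by x.toNat
decreasing_by
  rw [PySem.Int.floordiv_eq_ediv_of_pos (by omega)]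
  omega

def itov (x : Int) : List Int :=
  let digits : List Int := if x == 0 then [0] else []
  (itovLoop x digits).reverse

-- ===== PORT B =====
-- counting pass: while t > 0: t //= 7; n += 1
def itovCount (t : Int) : Int :=
  if h : t > 0 then itovCount (PySem.Int.floordiv t 7) + 1 else 0
termination_by t.toNat
decreasing_by
  rw [PySem.Int.floordiv_eq_ediv_of_pos (by omega)]
  omega

-- [(x // 7**(n-1-i)) % 7 for i in range(n)]; the exponent n-1-i is ≥ 0 for i in range(n),
-- so '.toNat' is exact there.
def itov_alt (x : Int) : List Int :=
  if x == 0 then [0]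
  else
    let n := itovCount x
    (PySem.List.pyRange 0 n 1).map (fun i =>
      PySem.Int.mod (PySem.Int.floordiv x (7 ^ (n - 1 - i).toNat)) 7)

-- ===== PRECONDITION & SPEC =====
def Spec_itov (x : Int) (out : List Int) : Prop := out = itov_alt x
instance (x : Int) (out : List Int) : Decidable (Spec_itov x out) := by unfold Spec_itov; infer_instance

-- ===== CLAIM (what is proved, stated in full; the proofs are below) =====
def Claim_equal_itov : Prop := ∀ (x : Int), Dom_itov x → Spec_itov x (itov x)

-- ===== LEMMAS AND PROOFS =====
theorem itovLoop_acc (x : Int) (acc : List Int) : itovLoop x acc = acc ++ itovLoop x [] := by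
  by_cases h : x > 0
  · have ha : ∀ a : List Int, itovLoop x a
        = itovLoop (PySem.Int.floordiv x 7) (a ++ [PySem.Int.mod x 7]) := by
      intro a; rw [itovLoop, dif_pos h]
    rw [ha acc, ha [],
      itovLoop_acc (PySem.Int.floordiv x 7) (acc ++ [PySem.Int.mod x 7]),
      itovLoop_acc (PySem.Int.floordiv x 7) ([] ++ [PySem.Int.mod x 7])]
    simp
  · have hb : ∀ a : List Int, itovLoop x a = a := by
      intro a; rw [itovLoop, dif_neg h]
    rw [hb acc, hb []]; simp
termination_by x.toNat
decreasing_by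
  all_goals rw [PySem.Int.floordiv_eq_ediv_of_pos (by omega)]; omega

theorem itovCount_nonneg (x : Int) : 0 ≤ itovCount x := by
  rw [itovCount]
  split
  · have := itovCount_nonneg (PySem.Int.floordiv x 7)
    omega
  · omega
termination_by x.toNat
decreasing_by
  rw [PySem.Int.floordiv_eq_ediv_of_pos (by omega)]; omega

theorem itov_main (x : Int) :
    (PySem.List.pyRange 0 (itovCount x) 1).map (fun i =>
      PySem.Int.mod (PySem.Int.floordiv x (7 ^ (itovCount x - 1 - i).toNat)) 7)
    = (itovLoop x []).reverse := by
  by_cases h : x > 0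
  · set d := PySem.Int.floordiv x 7 with hd
    have hm : 0 ≤ itovCount d := itovCount_nonneg d
    have hc : itovCount x = itovCount d + 1 := by rw [itovCount, dif_pos h]
    have hdiv : ∀ k : Nat, PySem.Int.floordiv x (7 ^ (k + 1)) = PySem.Int.floordiv d (7 ^ k) := by
      intro k
      rw [hd, PySem.Int.floordiv_eq_ediv_of_pos (a := x) (by positivity),
        PySem.Int.floordiv_eq_ediv_of_pos (by norm_num),
        PySem.Int.floordiv_eq_ediv_of_pos (by positivity),
        Int.ediv_ediv_of_nonneg (by norm_num), pow_succ, mul_comm]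
    rw [hc, PySem.List.pyRange_one_succ_right hm, List.map_append]
    have hlast : (PySem.List.pyRange 0 (itovCount d) 1).map (fun i =>
        PySem.Int.mod (PySem.Int.floordiv x (7 ^ (itovCount d + 1 - 1 - i).toNat)) 7)
        = (PySem.List.pyRange 0 (itovCount d) 1).map (fun i =>
        PySem.Int.mod (PySem.Int.floordiv d (7 ^ (itovCount d - 1 - i).toNat)) 7) := by
      apply List.map_congr_left
      intro i hi
      rw [PySem.List.mem_pyRange_one] at hi
      have he : (itovCount d + 1 - 1 - i).toNat = (itovCount d - 1 - i).toNat + 1 := by omega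
      rw [he, hdiv]
    rw [hlast, itov_main d]
    have hloop : itovLoop x [] = [PySem.Int.mod x 7] ++ itovLoop d [] := by
      rw [itovLoop, dif_pos h, itovLoop_acc, ← hd]
      simp
    have h0 : (itovCount d + 1 - 1 - itovCount d).toNat = 0 := by omega
    have hx1 : PySem.Int.floordiv x (7 ^ (0 : Nat)) = x := by
      rw [pow_zero, PySem.Int.floordiv_eq_ediv_of_pos (by norm_num), Int.ediv_one]
    rw [hloop]
    simp only [List.map_cons, List.map_nil, h0, hx1, List.reverse_cons, List.singleton_append]
  · have hc : itovCount x = 0 := by rw [itovCount, dif_neg h]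
    have hl : itovLoop x [] = [] := by rw [itovLoop, dif_neg h]
    simp [hc, hl, PySem.List.pyRange]
termination_by x.toNat
decreasing_by
  all_goals rw [PySem.Int.floordiv_eq_ediv_of_pos (by omega)]; omega

-- ===== VERDICT (by name: the statement is the Claim_ definition above) =====
theorem itov_spec : Claim_equal_itov := by
  intro x _
  unfold Spec_itov itov itov_alt
  by_cases hx : x = 0
  · subst hx; simp [itovLoop]
  · simp only [hx, beq_iff_eq]
    exact (itov_main x).symm
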